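-- pv_equiv track=rewrite | github.com/francoisgirard51/MrPython_exercices | loops2.py | index_max
-- ===== SOURCE A (Python) =====
-- def f(n: int) -> int:
--     '''Preconditions: n is an integer
--     returns the value of f(n)
--     '''
--     if n % 2 == 0 and n >= 0 and n < 20:
--         return -n ** 2//2 - 2 * n + 1
--     elif n % 2 == 1 and n >= -10 and n < 0:
--         return (n**2)-n+2
--     else:
--         return 2*n-5
--
-- def index_max(u0:int, n: int) -> int:
--     '''Preconditions: n>=0 and a is an integer
--     Returns the index of the greatest value among the terms u_0, u_1, . . . ,
--     one for the sequence defined by equation (2) with u0 = a.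
--     In the event of a tie, the smallest of the indices corresponding to the
--     maximum must be returned.
--     '''
--     u: int = u0
--     highest: int = u0
--     pos_highest: int = 0
--     i: int
--     for i in range(1, n+1):
--         u = f(u)
--         if u>highest:
--             highest = u
--             pos_highest = i
--     return pos_highest
-- ===== SOURCE B (Python) =====
-- def f(n: int) -> int:
--     if n % 2 == 0 and n >= 0 and n < 20:
--         return -n ** 2//2 - 2 * n + 1
--     elif n % 2 == 1 and n >= -10 and n < 0:
--         return (n**2)-n+2
--     else:
--         return 2*n-5
--
-- def index_max(u0: int, n: int) -> int:
--     # Build the whole sequence [u_0, ..., u_n], then locate the first maximum.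
--     seq = [u0]
--     u = u0
--     for _ in range(n):
--         u = f(u)
--         seq.append(u)
--     m = max(seq)
--     return seq.index(m)
-- ===== Notes on version B (the rewrite author's own statement) =====
-- stated objective: simpler
-- what changed: B materializes the whole sequence [u0..un] as a list and returns seq.index(max(seq)) instead of A's single online pass tracking a running maximum and its position.
import Mathlib
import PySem

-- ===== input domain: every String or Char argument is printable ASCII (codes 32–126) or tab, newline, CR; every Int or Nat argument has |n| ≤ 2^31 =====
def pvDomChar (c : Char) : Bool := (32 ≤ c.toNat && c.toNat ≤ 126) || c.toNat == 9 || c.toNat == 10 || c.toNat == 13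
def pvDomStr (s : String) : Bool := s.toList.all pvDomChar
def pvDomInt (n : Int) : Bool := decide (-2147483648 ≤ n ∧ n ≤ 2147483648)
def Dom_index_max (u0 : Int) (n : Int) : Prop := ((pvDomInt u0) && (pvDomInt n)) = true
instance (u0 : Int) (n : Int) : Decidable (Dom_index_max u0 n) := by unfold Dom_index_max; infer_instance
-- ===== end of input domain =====

-- B materializes the whole sequence [u0..un] as a list and returns seq.index(max(seq)) instead of A's online running-max pass (simpler decomposition).

-- ===== PORT A =====
def f (n : Int) : Int :=
  if PySem.Int.mod n 2 = 0 ∧ n ≥ 0 ∧ n < 20 then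
    PySem.Int.floordiv (-(n ^ 2)) 2 - 2 * n + 1
  else if PySem.Int.mod n 2 = 1 ∧ n ≥ -10 ∧ n < 0 then
    n ^ 2 - n + 2
  else
    2 * n - 5

def index_max (u0 : Int) (n : Int) : Int :=
  let st := (PySem.List.pyRange 1 (n + 1) 1).foldl
    (fun (s : Int × Int × Int) (i : Int) =>
      let u := f s.1
      if u > s.2.1 then (u, u, i) else (u, s.2.1, s.2.2))
    (u0, u0, 0)
  st.2.2

-- ===== PORT B =====
def index_max_alt (u0 : Int) (n : Int) : Int :=
  -- seq = [u0]; u = u0; for _ in range(n): u = f(u); seq.append(u)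
  let acc := (List.range n.toNat).foldl
    (fun (acc : List Int × Int) (_ : Nat) =>
      let u := f acc.2
      (acc.1 ++ [u], u))
    ([u0], u0)
  let seq := acc.1
  let m := (PySem.List.max? seq (fun x => x)).getD 0   -- max(seq); seq is never empty
  (((PySem.List.index? seq m).getD 0 : Nat) : Int)     -- seq.index(m); m is always an element

-- ===== PRECONDITION & SPEC =====
def Spec_index_max (u0 : Int) (n : Int) (out : Int) : Prop := out = index_max_alt u0 n
instance (u0 : Int) (n : Int) (out : Int) : Decidable (Spec_index_max u0 n out) := by unfold Spec_index_max; infer_instance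

-- ===== CLAIM (what is proved, stated in full; the proofs are below) =====
def Claim_equal_index_max : Prop := ∀ (u0 : Int) (n : Int), Dom_index_max u0 n → Spec_index_max u0 n (index_max u0 n)

-- ===== LEMMAS AND PROOFS =====

/-- `iter u k` = u_k of the recurrence starting at u. -/
def iter (u : Int) : Nat → Int
  | 0 => u
  | k + 1 => f (iter u k)

theorem iter_succ_shift (u : Int) (k : Nat) : iter u (k + 1) = iter (f u) k := by
  induction k with
  | zero => rfl
  | succ k ih => show f (iter u (k+1)) = _; rw [ih]; rfl

/-- The full sequence [u_0, ..., u_N]. -/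
def mapSeq (u : Int) (N : Nat) : List Int := (List.range (N + 1)).map (iter u)

theorem mapSeq_eq (u : Int) (N : Nat) :
    mapSeq u N = u :: (List.range N).map (fun (k : Nat) => iter u (k + 1)) := by
  unfold mapSeq
  rw [List.range_succ_eq_map, List.map_cons, List.map_map]
  rfl

theorem mapSeq_snoc (u : Int) (N : Nat) :
    mapSeq u (N + 1) = mapSeq u N ++ [iter u (N + 1)] := by
  unfold mapSeq
  rw [List.range_succ, List.map_append]
  rfl

/-- The clean tail loop: scan values with strict `>`, carrying current index. -/
def G : Int × Int → Int → List Int → Int × Int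
  | st, _, [] => st
  | (h, p), i, v :: t => if v > h then G (v, i) (i + 1) t else G (h, p) (i + 1) t

/-- A's foldl over the index range equals `G` over the value list. -/
theorem foldA_eq_G (N : Nat) : ∀ (u h p a : Int),
    ((List.range N).map (fun (k : Nat) => a + (k : Int))).foldl
      (fun (s : Int × Int × Int) (i : Int) =>
        let u := f s.1
        if u > s.2.1 then (u, u, i) else (u, s.2.1, s.2.2))
      (u, h, p)
    = (iter u N, G (h, p) a ((List.range N).map (fun (k : Nat) => iter u (k + 1)))) := by
  induction N with
  | zero => intro u h p a; simp [iter, G]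
  | succ N ih =>
    intro u h p a
    rw [List.range_succ_eq_map, List.map_cons, List.map_cons, List.map_map, List.map_map]
    have h1 : (List.map ((fun (k : Nat) => a + (k : Int)) ∘ Nat.succ) (List.range N))
        = List.map (fun (k : Nat) => (a + 1) + (k : Int)) (List.range N) := by
      apply List.map_congr_left; intro k _
      show a + ((k + 1 : Nat) : Int) = (a + 1) + (k : Int)
      push_cast; ring
    have h2 : (List.map ((fun (k : Nat) => iter u (k + 1)) ∘ Nat.succ) (List.range N))
        = List.map (fun (k : Nat) => iter (f u) (k + 1)) (List.range N) := by
      apply List.map_congr_left; intro k _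
      show iter u (k + 1 + 1) = iter (f u) (k + 1)
      exact iter_succ_shift u (k + 1)
    rw [h1, h2]
    simp only [List.foldl_cons, Nat.cast_zero, add_zero]
    have hh : iter u (0 + 1) = f u := rfl
    rw [hh]
    simp only [G]
    by_cases hc : f u > h
    · rw [if_pos hc, if_pos hc, ih (f u) (f u) a (a + 1), iter_succ_shift u N]
    · rw [if_neg hc, if_neg hc, ih (f u) h p (a + 1), iter_succ_shift u N]

/-- Loop invariant for `G`: starting from the max of a nonempty prefix and the
    index of its first occurrence, `G` returns the max of the full list and the
    index of its first occurrence. -/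
theorem G_invariant (t : List Int) : ∀ (pre : List Int) (h : Int) (p : Nat),
    h ∈ pre → (∀ x ∈ pre, x ≤ h) → PySem.List.index? pre h = some p →
    ∃ (k : Nat),
      (G (h, (p : Int)) (pre.length : Int) t).2 = (k : Int) ∧
      PySem.List.index? (pre ++ t) (G (h, (p : Int)) (pre.length : Int) t).1 = some k ∧
      (G (h, (p : Int)) (pre.length : Int) t).1 ∈ pre ++ t ∧
      (∀ x ∈ pre ++ t, x ≤ (G (h, (p : Int)) (pre.length : Int) t).1) := by
  induction t with
  | nil =>
    intro pre h p hmem hmax hidx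
    exact ⟨p, rfl, by simpa using hidx, by simpa using hmem, by simpa using hmax⟩
  | cons v t ih =>
    intro pre h p hmem hmax hidx
    have hsplit : pre ++ v :: t = (pre ++ [v]) ++ t := by simp
    by_cases hc : v > h
    · simp only [G, hc, if_pos]
      have hvnot : v ∉ pre := fun hv => absurd hc (not_lt.mpr (hmax v hv))
      have hmem' : v ∈ pre ++ [v] := by simp
      have hmax' : ∀ x ∈ pre ++ [v], x ≤ v := by
        intro x hx
        rcases List.mem_append.mp hx with hx | hx
        · exact le_of_lt (lt_of_le_of_lt (hmax x hx) hc)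
        · simp at hx; omega
      have hidx' : PySem.List.index? (pre ++ [v]) v = some pre.length :=
        PySem.List.index?_append_singleton_self pre v hvnot
      have hlen : ((pre ++ [v]).length : Int) = (pre.length : Int) + 1 := by simp
      obtain ⟨k, hk1, hk2, hk3, hk4⟩ := ih (pre ++ [v]) v pre.length hmem' hmax' hidx'
      rw [hlen] at hk1 hk2 hk3 hk4
      exact ⟨k, hk1, hsplit ▸ hk2, hsplit ▸ hk3, hsplit ▸ hk4⟩
    · simp only [G, hc]
      have hmem' : h ∈ pre ++ [v] := List.mem_append_left _ hmem
      have hmax' : ∀ x ∈ pre ++ [v], x ≤ h := by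
        intro x hx
        rcases List.mem_append.mp hx with hx | hx
        · exact hmax x hx
        · simp at hx; omega
      have hidx' : PySem.List.index? (pre ++ [v]) h = some p := by
        rw [PySem.List.index?_append_of_mem [v] hmem]; exact hidx
      have hlen : ((pre ++ [v]).length : Int) = (pre.length : Int) + 1 := by simp
      obtain ⟨k, hk1, hk2, hk3, hk4⟩ := ih (pre ++ [v]) h p hmem' hmax' hidx'
      rw [hlen] at hk1 hk2 hk3 hk4
      exact ⟨k, hk1, hsplit ▸ hk2, hsplit ▸ hk3, hsplit ▸ hk4⟩

/-- B's list-building foldl produces exactly `mapSeq u0 N` (and tracks `iter u0 N`). -/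
theorem buildB (u0 : Int) (N : Nat) :
    (List.range N).foldl
      (fun (acc : List Int × Int) (_ : Nat) =>
        let u := f acc.2
        (acc.1 ++ [u], u))
      ([u0], u0) = (mapSeq u0 N, iter u0 N) := by
  induction N with
  | zero => simp [mapSeq, iter]
  | succ N ih =>
    rw [List.range_succ, List.foldl_append, ih]
    simp only [List.foldl_cons, List.foldl_nil]
    rw [mapSeq_snoc]
    rfl

-- ===== VERDICT (by name: the statement is the Claim_ definition above) =====
theorem index_max_spec : Claim_equal_index_max := by
  intro u0 n _
  unfold Spec_index_max index_max index_max_alt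
  set N := n.toNat with hN
  have hr : PySem.List.pyRange 1 (n + 1) 1
      = (List.range N).map (fun (k : Nat) => 1 + (k : Int)) := by
    rw [PySem.List.pyRange_one]
    have : n + 1 - 1 = n := by ring
    rw [this]
  rw [hr, buildB, foldA_eq_G]
  have hseq := mapSeq_eq u0 N
  set t := (List.range N).map (fun (k : Nat) => iter u0 (k + 1)) with ht
  set g := G (u0, (0 : Int)) 1 t with hg
  have hinv := G_invariant t [u0] u0 0
    (by simp) (by simp) (by rw [PySem.List.index?_eq_idxOf?]; simp)
  simp only [List.length_singleton, Nat.cast_one, Nat.cast_zero, List.singleton_append] at hinv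
  obtain ⟨k, hk1, hk2, hk3, hk4⟩ := hinv
  have hmax : PySem.List.max? (u0 :: t) (fun x => x) = some (t.foldl max u0) :=
    PySem.List.max?_id_cons u0 t
  have hMmem : t.foldl max u0 ∈ u0 :: t := PySem.List.max?_mem hmax
  have hMmax : ∀ y ∈ u0 :: t, y ≤ t.foldl max u0 := fun y hy => PySem.List.max?_isMax hmax y hy
  have hMeq : t.foldl max u0 = g.1 := le_antisymm (hk4 _ hMmem) (hMmax _ hk3)
  rw [hseq]
  show g.2 = (((PySem.List.index? (u0 :: t)
      ((PySem.List.max? (u0 :: t) (fun x => x)).getD 0)).getD 0 : Nat) : Int)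
  rw [hmax]
  simp only [Option.getD_some]
  rw [hMeq, hk2]
  simp only [Option.getD_some]
  exact hk1
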